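-- pv_equiv track=rewrite | github.com/L928/typing-trainer | src/functions.py | compareText
-- ===== SOURCE A (Python) =====
-- def compareText(a,b):
--   stringMap = ''
--   la = len(a)
--   lb = len(b)
--   # returns a string map of differences
--   for x in range(max(la,lb)):
--
--     if x >= la:
--       stringMap+=("a")
--     elif x >= lb:
--       stringMap+=("b")
--     elif a[x] != b[x]:
--       stringMap+=("x")
--     else:
--       stringMap+=(".") # means: equal
--   return stringMap
-- ===== SOURCE B (Python) =====
-- def compareText(a, b):
--     # Build the diff map BACK-TO-FRONT in three staged loops, then reverse:
--     # first the length-mismatch tail, then the compare marks descending.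
--     i, j = len(a), len(b)
--     out = []
--     while i < j:
--         j -= 1
--         out.append('a')
--     while j < i:
--         i -= 1
--         out.append('b')
--     while i:
--         i -= 1
--         out.append('.' if a[i] == b[i] else 'x')
--     out.reverse()
--     return ''.join(out)
-- ===== Notes on version B (the rewrite author's own statement) =====
-- stated objective: alternative
-- what changed: Replaces A's single forward indexed loop with four per-index exhaustion/compare branches by three staged backward while-loops that build the map in reverse (length-mismatch tail first, then compare marks descending) followed by one reversal.
import Mathlib
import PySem

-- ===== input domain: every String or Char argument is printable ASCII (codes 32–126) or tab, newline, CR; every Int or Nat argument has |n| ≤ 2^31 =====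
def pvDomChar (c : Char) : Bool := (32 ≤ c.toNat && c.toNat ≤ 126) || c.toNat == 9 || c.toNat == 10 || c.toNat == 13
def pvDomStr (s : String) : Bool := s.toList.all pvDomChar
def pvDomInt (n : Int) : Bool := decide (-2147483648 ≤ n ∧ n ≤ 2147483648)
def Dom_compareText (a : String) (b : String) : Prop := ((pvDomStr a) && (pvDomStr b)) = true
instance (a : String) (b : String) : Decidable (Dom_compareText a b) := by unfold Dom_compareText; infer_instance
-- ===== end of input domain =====

-- B builds the diff map back-to-front in three staged backward loops (tail first,
-- then compare marks descending) and reverses once: a different decomposition.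

-- ===== PORT A =====
def compareText (a : String) (b : String) : String :=
  let aL := a.toList
  let bL := b.toList
  let la : Int := aL.length
  let lb : Int := bL.length
  String.ofList ((PySem.List.pyRange 0 (max la lb) 1).foldl (fun sm x =>
    if x ≥ la then sm ++ ['a']
    else if x ≥ lb then sm ++ ['b']
    else if PySem.List.pyGet? aL x ≠ PySem.List.pyGet? bL x then sm ++ ['x']
    else sm ++ ['.']) [])

-- ===== PORT B =====
/-- Source B's first loop: `while i < j: j -= 1; out.append('a')`; returns final (j, out). -/
def ctLoopA (i j : Nat) (out : List Char) : Nat × List Char :=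
  if i < j then ctLoopA i (j - 1) (out ++ ['a']) else (j, out)
termination_by j

/-- Source B's second loop: `while j < i: i -= 1; out.append('b')`; returns final (i, out). -/
def ctLoopB (j i : Nat) (out : List Char) : Nat × List Char :=
  if j < i then ctLoopB j (i - 1) (out ++ ['b']) else (i, out)
termination_by i

/-- Source B's third loop: `while i: i -= 1; out.append('.' if a[i]==b[i] else 'x')`. -/
def ctLoopC (A B : List Char) (i : Nat) (out : List Char) : List Char :=
  if 0 < i then
    ctLoopC A B (i - 1) (out ++ [if A[i-1]? = B[i-1]? then '.' else 'x'])
  else out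
termination_by i

def compareText_alt (a : String) (b : String) : String :=
  let aL := a.toList
  let bL := b.toList
  let r1 := ctLoopA aL.length bL.length []
  let r2 := ctLoopB r1.1 aL.length r1.2
  String.ofList (ctLoopC aL bL r2.1 r2.2).reverse

-- ===== PRECONDITION & SPEC =====
def Spec_compareText (a : String) (b : String) (out : String) : Prop := out = compareText_alt a b
instance (a : String) (b : String) (out : String) : Decidable (Spec_compareText a b out) := by unfold Spec_compareText; infer_instance

-- ===== CLAIM (what is proved, stated in full; the proofs are below) =====
def Claim_equal_compareText : Prop := ∀ (a : String) (b : String), Dom_compareText a b → Spec_compareText a b (compareText a b)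

-- ===== LEMMAS AND PROOFS =====

/-- The per-index character A's loop appends, indexed by a natural number. -/
def pvG (A B : List Char) (k : Nat) : Char :=
  if A.length ≤ k then 'a'
  else if B.length ≤ k then 'b'
  else if A[k]? ≠ B[k]? then 'x'
  else '.'

/-- The compare mark B's third loop emits at index k. -/
def pvC (A B : List Char) (k : Nat) : Char :=
  if A[k]? = B[k]? then '.' else 'x'

lemma ctLoopA_eq (i : Nat) : ∀ (j : Nat) (out : List Char),
    ctLoopA i j out = (min i j, out ++ List.replicate (j - i) 'a') := by
  intro j
  induction j using Nat.strong_induction_on with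
  | _ j ih =>
    intro out
    rw [ctLoopA]
    by_cases h : i < j
    · rw [if_pos h, ih (j - 1) (by omega)]
      have h1 : min i (j - 1) = min i j := by omega
      have h2 : j - i = (j - 1 - i) + 1 := by omega
      rw [h1, List.append_assoc, h2]
      simp [List.replicate_succ]
    · rw [if_neg h]
      have h1 : min i j = j := by omega
      have h2 : j - i = 0 := by omega
      simp [h1, h2]

lemma ctLoopB_eq (j : Nat) : ∀ (i : Nat) (out : List Char),
    ctLoopB j i out = (min i j, out ++ List.replicate (i - j) 'b') := by
  intro i
  induction i using Nat.strong_induction_on with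
  | _ i ih =>
    intro out
    rw [ctLoopB]
    by_cases h : j < i
    · rw [if_pos h, ih (i - 1) (by omega)]
      have h1 : min (i - 1) j = min i j := by omega
      have h2 : i - j = (i - 1 - j) + 1 := by omega
      rw [h1, List.append_assoc, h2]
      simp [List.replicate_succ]
    · rw [if_neg h]
      have h1 : min i j = i := by omega
      have h2 : i - j = 0 := by omega
      simp [h1, h2]

lemma ctLoopC_eq (A B : List Char) : ∀ (i : Nat) (out : List Char),
    ctLoopC A B i out = out ++ ((List.range i).map (pvC A B)).reverse := by
  intro i
  induction i with
  | zero => intro out; rw [ctLoopC]; simp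
  | succ n ih =>
    intro out
    rw [ctLoopC, if_pos (Nat.succ_pos n)]
    simp only [Nat.add_sub_cancel]
    rw [ih, List.range_succ, List.map_append, List.reverse_append]
    simp [pvC, List.append_assoc]

lemma pvKey (A : List Char) : ∀ (B : List Char),
    (List.range (max A.length B.length)).map (pvG A B)
      = (List.range (min A.length B.length)).map (pvC A B)
        ++ List.replicate (B.length - A.length) 'a'
        ++ List.replicate (A.length - B.length) 'b' := by
  induction A with
  | nil =>
    intro B
    simp only [List.length_nil, Nat.zero_max, Nat.zero_min, List.range_zero,
      List.map_nil, List.nil_append, Nat.sub_zero, Nat.zero_sub,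
      List.replicate_zero, List.append_nil]
    rw [List.map_congr_left (g := fun _ => 'a') (fun k _ => by simp [pvG])]
    simp [List.map_const']
  | cons x xs ih =>
    intro B
    cases B with
    | nil =>
      simp only [List.length_nil, Nat.max_zero, Nat.min_zero, List.range_zero,
        List.map_nil, List.nil_append, Nat.zero_sub, Nat.sub_zero,
        List.replicate_zero, List.nil_append]
      rw [List.map_congr_left (g := fun _ => 'b')
        (fun k hk => by
          rw [List.mem_range] at hk
          simp only [pvG, List.length_nil, Nat.zero_le, if_true]
          rw [if_neg (by omega)])]
      simp [List.map_const']
    | cons y ys =>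
      have hmax : max (x :: xs).length (y :: ys).length
          = max xs.length ys.length + 1 := by
        simp [Nat.succ_max_succ]
      have hmin : min (x :: xs).length (y :: ys).length
          = min xs.length ys.length + 1 := by
        simp [Nat.succ_min_succ]
      rw [hmax, hmin, List.range_succ_eq_map, List.range_succ_eq_map,
        List.map_cons, List.map_cons, List.map_map, List.map_map]
      have hA : (List.range (max xs.length ys.length)).map
          (pvG (x :: xs) (y :: ys) ∘ Nat.succ)
          = (List.range (max xs.length ys.length)).map (pvG xs ys) := by
        apply List.map_congr_left
        intro k _
        simp only [Function.comp_apply, pvG, List.length_cons,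
          List.getElem?_cons_succ, Nat.succ_eq_add_one, Nat.add_le_add_iff_right]
        rfl
      have hC : (List.range (min xs.length ys.length)).map
          (pvC (x :: xs) (y :: ys) ∘ Nat.succ)
          = (List.range (min xs.length ys.length)).map (pvC xs ys) := by
        apply List.map_congr_left
        intro k _
        simp [pvC]
      have h0 : pvG (x :: xs) (y :: ys) 0 = pvC (x :: xs) (y :: ys) 0 := by
        by_cases hxy : x = y <;> simp [pvG, pvC, hxy]
      rw [hA, hC, ih ys, h0]
      simp [List.append_assoc]

lemma pvFold (f : List Char → Nat → List Char) (g : Nat → Char)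
    (h : ∀ sm k, f sm k = sm ++ [g k]) (l : List Nat) : ∀ (acc : List Char),
    l.foldl f acc = acc ++ l.map g := by
  induction l with
  | nil => intro acc; simp
  | cons k l ih => intro acc; simp [h, ih]

-- ===== VERDICT (by name: the statement is the Claim_ definition above) =====
theorem compareText_spec : Claim_equal_compareText := by
  intro a b _
  unfold Spec_compareText compareText compareText_alt
  simp only []
  set aL := a.toList
  set bL := b.toList
  refine congrArg String.ofList ?_
  -- A side: fold over pyRange = map of pvG over range (max)
  have hmaxc : max (aL.length : Int) (bL.length : Int)
      = ((max aL.length bL.length : Nat) : Int) := by push_cast; rfl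
  rw [hmaxc, PySem.List.pyRange_zero_nat, List.foldl_map]
  have h : ∀ (sm : List Char) (k : Nat),
      (if ((k : Int)) ≥ (aL.length : Int) then sm ++ ['a']
       else if ((k : Int)) ≥ (bL.length : Int) then sm ++ ['b']
       else if PySem.List.pyGet? aL (k : Int) ≠ PySem.List.pyGet? bL (k : Int) then sm ++ ['x']
       else sm ++ ['.']) = sm ++ [pvG aL bL k] := by
    intro sm k
    simp only [pvG, PySem.List.pyGet?_natCast, ge_iff_le, Nat.cast_le]
    split_ifs <;> rfl
  rw [pvFold _ (pvG aL bL) h, List.nil_append, pvKey]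
  -- B side: unfold the three loops
  rw [ctLoopA_eq, ctLoopB_eq, ctLoopC_eq]
  simp only [List.nil_append]
  rw [List.reverse_append, List.reverse_reverse, List.reverse_append,
    List.reverse_replicate, List.reverse_replicate]
  have hmm : min aL.length (min aL.length bL.length) = min aL.length bL.length := by
    omega
  rw [hmm]
  rcases Nat.le_total aL.length bL.length with hle | hle
  · have h1 : aL.length - bL.length = 0 := by omega
    have h2 : aL.length - min aL.length bL.length = 0 := by omega
    simp [h1, h2]
  · have h1 : bL.length - aL.length = 0 := by omega
    have h2 : aL.length - min aL.length bL.length = aL.length - bL.length := by omega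
    simp [h1, h2]
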